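-- pv_equiv track=rewrite | github.com/Viktoria2026/algo-labs | gas_supply.py | check_gas_supply
-- ===== SOURCE A (Python) =====
-- def check_gas_supply(cities, storages, pipes):
--     graph = {}
--     for u, v in pipes:
--         if u not in graph:
--             graph[u] = []
--         graph[u].append(v)
--
--     result = []
--
--     for storage in storages:
--         visited = set()
--         stack = [storage]
--         visited.add(storage)
--
--         while stack:
--             current = stack.pop()
--
--             for neighbor in graph.get(current, []):
--                 if neighbor not in visited:
--                     visited.add(neighbor)
--                     stack.append(neighbor)
--
--         unreachable_cities = []
--         for city in cities:
--             if city not in visited: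
--                 unreachable_cities.append(city)
--
--         if unreachable_cities:
--             result.append([storage, unreachable_cities])
--
--     return result
-- ===== SOURCE B (Python) =====
-- def check_gas_supply(cities, storages, pipes):
--     graph = {}
--     for u, v in pipes:
--         graph.setdefault(u, []).append(v)
--
--     cache = {}
--     result = []
--     for storage in storages:
--         if storage in cache:
--             unreachable = cache[storage]
--         else:
--             visited = {storage}
--             frontier = [storage]
--             while frontier:
--                 nxt = []
--                 for u in frontier:
--                     for v in graph.get(u, []):
--                         if v not in visited:
--                             visited.add(v)
--                             nxt.append(v)
--                 frontier = nxt
--             unreachable = [c for c in cities if c not in visited]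
--             cache[storage] = unreachable
--         if unreachable:
--             result.append([storage, unreachable])
--     return result
-- ===== Notes on version B (the rewrite author's own statement) =====
-- stated objective: alternative
-- what changed: A's per-storage iterative stack DFS is replaced by level-by-level BFS over a frontier list with a per-storage memo cache (duplicate storages reuse the computed unreachable list), and the unreachable-accumulator loop by a filter comprehension.
import Mathlib
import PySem

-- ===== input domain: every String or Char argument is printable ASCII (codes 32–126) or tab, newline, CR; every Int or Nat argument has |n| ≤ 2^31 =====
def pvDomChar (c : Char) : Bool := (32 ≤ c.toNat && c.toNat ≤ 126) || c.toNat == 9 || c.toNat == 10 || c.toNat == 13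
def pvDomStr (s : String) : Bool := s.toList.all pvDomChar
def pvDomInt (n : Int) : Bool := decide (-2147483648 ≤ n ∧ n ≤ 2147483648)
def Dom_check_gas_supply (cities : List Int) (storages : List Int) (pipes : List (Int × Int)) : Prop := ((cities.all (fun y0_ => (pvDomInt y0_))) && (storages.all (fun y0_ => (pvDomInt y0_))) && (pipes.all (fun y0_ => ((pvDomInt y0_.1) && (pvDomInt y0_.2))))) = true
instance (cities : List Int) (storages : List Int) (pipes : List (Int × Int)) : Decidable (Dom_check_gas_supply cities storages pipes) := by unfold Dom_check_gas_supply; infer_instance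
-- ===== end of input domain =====

-- B replaces A's per-storage stack DFS by level-by-level BFS with a per-storage memo cache
-- and a filter comprehension for the unreachable list (objective: alternative).

-- ===== PORT A =====
-- Both Pythons build the identical adjacency dict (A: "if u not in graph: graph[u] = []" then
-- append; B: setdefault(u, []).append(v)); both are exactly graph[u] = graph.get(u, []) + [v].
def buildAdj (pipes : List (Int × Int)) : PySem.Dict Int (List Int) :=
  pipes.foldl (fun g p => PySem.Dict.modify g p.1 [] (fun l => l ++ [p.2])) PySem.Dict.empty

-- A's "while stack" loop; the stack top (Python's list end, stack.pop()) is the list HEAD here.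
-- The fuel 'pipes.length + 1' is a totality guard only: the loop pops at most 1 + pipes.length
-- times (each push adds a fresh node to visited), so the fuel never runs out (proved below).
def dfsStack (g : PySem.Dict Int (List Int)) : Nat → List Int → PySem.Set Int → PySem.Set Int
  | 0, _, visited => visited
  | _+1, [], visited => visited
  | fuel+1, current :: rest, visited =>
    let sv := (g.getD current []).foldl
      (fun (sv : List Int × PySem.Set Int) n =>
        if PySem.Set.contains sv.2 n then sv else (n :: sv.1, PySem.Set.add sv.2 n))
      (rest, visited)
    dfsStack g fuel sv.1 sv.2

def check_gas_supply (cities : List Int) (storages : List Int) (pipes : List (Int × Int)) : List (Int × List Int) :=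
  let graph := buildAdj pipes
  storages.foldl (fun result storage =>
    let visited := dfsStack graph (pipes.length + 1) [storage] (PySem.Set.ofList [storage])
    let unreachable := cities.foldl
      (fun acc city => if PySem.Set.contains visited city then acc else acc ++ [city]) []
    if unreachable.isEmpty then result else result ++ [(storage, unreachable)]) []

-- ===== PORT B =====
-- B's "while frontier" loop: one whole level per iteration.  Fuel 'pipes.length + 2' is again
-- only a totality guard: every round with a nonempty next frontier grows visited (proved below).
def bfsLevels (g : PySem.Dict Int (List Int)) : Nat → List Int → PySem.Set Int → PySem.Set Int
  | 0, _, visited => visited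
  | _+1, [], visited => visited
  | fuel+1, u0 :: fr, visited =>
    let nv := (u0 :: fr).foldl
      (fun (acc : List Int × PySem.Set Int) u =>
        (g.getD u []).foldl
          (fun (acc : List Int × PySem.Set Int) v =>
            if PySem.Set.contains acc.2 v then acc else (acc.1 ++ [v], PySem.Set.add acc.2 v))
          acc)
      ([], visited)
    bfsLevels g fuel nv.1 nv.2

def check_gas_supply_alt (cities : List Int) (storages : List Int) (pipes : List (Int × Int)) : List (Int × List Int) :=
  let graph := buildAdj pipes
  (storages.foldl (fun (rc : List (Int × List Int) × PySem.Dict Int (List Int)) storage =>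
    match rc.2.get? storage with
    | some unreachable =>
        (if unreachable.isEmpty then rc.1 else rc.1 ++ [(storage, unreachable)], rc.2)
    | none =>
        let visited := bfsLevels graph (pipes.length + 2) [storage] (PySem.Set.ofList [storage])
        let unreachable := cities.filter (fun c => !(PySem.Set.contains visited c))
        (if unreachable.isEmpty then rc.1 else rc.1 ++ [(storage, unreachable)],
         rc.2.insert storage unreachable)) ([], PySem.Dict.empty)).1

-- ===== PRECONDITION & SPEC =====
def Spec_check_gas_supply (cities : List Int) (storages : List Int) (pipes : List (Int × Int)) (out : List (Int × List Int)) : Prop := out = check_gas_supply_alt cities storages pipes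
instance (cities : List Int) (storages : List Int) (pipes : List (Int × Int)) (out : List (Int × List Int)) : Decidable (Spec_check_gas_supply cities storages pipes out) := by unfold Spec_check_gas_supply; infer_instance

-- ===== CLAIM (what is proved, stated in full; the proofs are below) =====
def Claim_equal_check_gas_supply : Prop := ∀ (cities : List Int) (storages : List Int) (pipes : List (Int × Int)), Dom_check_gas_supply cities storages pipes → Spec_check_gas_supply cities storages pipes (check_gas_supply cities storages pipes)

-- ===== LEMMAS AND PROOFS =====

-- Reachability in the pipe graph: the common specification both searches compute.
def Reaches (pipes : List (Int × Int)) (s x : Int) : Prop :=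
  Relation.ReflTransGen (fun a b => (a, b) ∈ pipes) s x

lemma nodup_length_le (d l : List Int) (h : d.Nodup) (hs : d ⊆ l) : d.length ≤ l.length := by
  calc d.length = d.toFinset.card := (List.toFinset_card_of_nodup h).symm
    _ ≤ l.toFinset.card := Finset.card_le_card (by intro x hx; simp at hx ⊢; exact hs hx)
    _ ≤ l.length := l.toFinset_card_le

lemma mem_adj (pipes : List (Int × Int)) (u v : Int) :
    v ∈ (buildAdj pipes).getD u [] ↔ (u, v) ∈ pipes := by
  unfold buildAdj
  rw [PySem.Dict.getD_foldl_modify_append]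
  simp only [PySem.Dict.getD_empty, List.nil_append, List.mem_map, List.mem_filter]
  constructor
  · rintro ⟨p, ⟨hp, he⟩, rfl⟩
    have : p.1 = u := by simpa using he
    exact this ▸ hp
  · intro h
    exact ⟨(u, v), ⟨h, by simp⟩, rfl⟩

-- The inner "for neighbor: if not visited: push + add" fold.  'push' is '(n :: ·)' in A and
-- '(· ++ [n])' in B; the visited component is always Set.update.
lemma foldStep_snd (push : List Int → Int → List Int) (L st : List Int) (vis : PySem.Set Int) :
    (L.foldl (fun (sv : List Int × PySem.Set Int) n =>
      if PySem.Set.contains sv.2 n then sv else (push sv.1 n, PySem.Set.add sv.2 n)) (st, vis)).2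
    = PySem.Set.update vis L := by
  induction L generalizing st vis with
  | nil => simp [PySem.Set.update_nil]
  | cons n L ih =>
    rw [List.foldl_cons, PySem.Set.update_cons]
    by_cases h : n ∈ vis
    · have hc : PySem.Set.contains vis n = true := by simp [PySem.Set.contains_eq_listContains, h]
      simp only [hc, if_true, PySem.Set.add_of_mem h]
      exact ih st vis
    · have hc : PySem.Set.contains vis n = false := by simp [PySem.Set.contains_eq_listContains, h]
      simp only [hc, Bool.false_eq_true, if_false]
      exact ih (push st n) (PySem.Set.add vis n)

lemma foldStep_fst (push : List Int → Int → List Int)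
    (hmem : ∀ s n x, x ∈ push s n ↔ x = n ∨ x ∈ s)
    (hlen : ∀ s n, (push s n).length = s.length + 1)
    (L : List Int) : ∀ (st : List Int) (vis : PySem.Set Int) (r : List Int × PySem.Set Int),
    r = L.foldl (fun (sv : List Int × PySem.Set Int) n =>
      if PySem.Set.contains sv.2 n then sv else (push sv.1 n, PySem.Set.add sv.2 n)) (st, vis) →
    (∀ x ∈ st, x ∈ r.1) ∧
    (∀ x ∈ r.1, x ∈ st ∨ (x ∈ L ∧ x ∉ vis)) ∧
    (∀ x ∈ L, x ∈ vis ∨ x ∈ r.1) ∧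
    (r.1.length + vis.length = st.length + r.2.length) := by
  induction L with
  | nil =>
    intro st vis r hr
    subst hr
    exact ⟨fun x hx => hx, fun x hx => Or.inl hx, by simp, by simp⟩
  | cons n L ih =>
    intro st vis r hr
    rw [List.foldl_cons] at hr
    by_cases h : n ∈ vis
    · have hc : PySem.Set.contains vis n = true := by simp [PySem.Set.contains_eq_listContains, h]
      simp only [hc, if_true] at hr
      obtain ⟨f1, f2, f3, f4⟩ := ih st vis r hr
      refine ⟨f1, ?_, ?_, f4⟩
      · intro x hx
        rcases f2 x hx with h1 | ⟨h1, h2⟩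
        · exact Or.inl h1
        · exact Or.inr ⟨List.mem_cons_of_mem _ h1, h2⟩
      · intro x hx
        rcases List.mem_cons.mp hx with rfl | hx'
        · exact Or.inl h
        · exact f3 x hx'
    · have hc : PySem.Set.contains vis n = false := by simp [PySem.Set.contains_eq_listContains, h]
      simp only [hc, Bool.false_eq_true, if_false] at hr
      obtain ⟨f1, f2, f3, f4⟩ := ih (push st n) (PySem.Set.add vis n) r hr
      have hn_r1 : n ∈ r.1 := f1 n ((hmem st n n).mpr (Or.inl rfl))
      refine ⟨?_, ?_, ?_, ?_⟩
      · intro x hx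
        exact f1 x ((hmem st n x).mpr (Or.inr hx))
      · intro x hx
        rcases f2 x hx with h1 | ⟨h1, h2⟩
        · rcases (hmem st n x).mp h1 with rfl | h1'
          · exact Or.inr ⟨List.mem_cons_self, h⟩
          · exact Or.inl h1'
        · refine Or.inr ⟨List.mem_cons_of_mem _ h1, fun hx' => h2 ?_⟩
          rw [PySem.Set.mem_add]
          exact Or.inl hx'
      · intro x hx
        rcases List.mem_cons.mp hx with rfl | hx'
        · exact Or.inr hn_r1
        · rcases f3 x hx' with h1 | h1
          · rcases (PySem.Set.mem_add _ _ _).mp h1 with h2 | rfl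
            · exact Or.inl h2
            · exact Or.inr hn_r1
          · exact Or.inr h1
      · have hadd : (PySem.Set.add vis n).length = vis.length + 1 := by
          rw [PySem.Set.add_of_not_mem h]; simp
        rw [hlen st n, hadd] at f4
        omega

-- B's per-level fold over the whole frontier.
lemma midFold_facts (g : PySem.Dict Int (List Int)) (F : List Int) :
    ∀ (nxt : List Int) (vis : PySem.Set Int) (r : List Int × PySem.Set Int),
    r = F.foldl (fun (acc : List Int × PySem.Set Int) u =>
          (g.getD u []).foldl
            (fun (acc : List Int × PySem.Set Int) v =>
              if PySem.Set.contains acc.2 v then acc else (acc.1 ++ [v], PySem.Set.add acc.2 v))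
            acc) (nxt, vis) →
    (∀ x ∈ vis, x ∈ r.2) ∧
    (∀ x ∈ r.2, x ∈ vis ∨ ∃ u ∈ F, x ∈ g.getD u []) ∧
    (∀ u ∈ F, ∀ v ∈ g.getD u [], v ∈ r.2) ∧
    (vis.Nodup → r.2.Nodup) ∧
    (r.1.length + vis.length = nxt.length + r.2.length) ∧
    (∀ x ∈ nxt, x ∈ r.1) ∧
    (∀ x ∈ r.2, x ∈ vis ∨ x ∈ r.1) ∧
    ((∀ x ∈ nxt, x ∈ vis) → ∀ x ∈ r.1, x ∈ r.2) := by
  have hpm : ∀ (s : List Int) (n x : Int), x ∈ s ++ [n] ↔ x = n ∨ x ∈ s := by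
    intro s n x; simp [or_comm]
  have hpl : ∀ (s : List Int) (n : Int), (s ++ [n]).length = s.length + 1 := by simp
  induction F with
  | nil =>
    intro nxt vis r hr
    subst hr
    exact ⟨fun x hx => hx, fun x hx => Or.inl hx, by simp, fun h => h, by simp,
      fun x hx => hx, fun x hx => Or.inl hx, fun h x hx => h x hx⟩
  | cons u0 F ih =>
    intro nxt vis r hr
    rw [List.foldl_cons] at hr
    set L := g.getD u0 [] with hL
    -- one inner step
    set p := L.foldl (fun (acc : List Int × PySem.Set Int) v =>
        if PySem.Set.contains acc.2 v then acc else (acc.1 ++ [v], PySem.Set.add acc.2 v)) (nxt, vis) with hp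
    have hsnd : p.2 = PySem.Set.update vis L := by
      rw [hp]; exact foldStep_snd (fun s n => s ++ [n]) L nxt vis
    obtain ⟨f1, f2, f3, f4⟩ := foldStep_fst (fun s n => s ++ [n]) hpm hpl L nxt vis p hp
    obtain ⟨m1, m2, m3, m4, m5, m6, m7, m8⟩ := ih p.1 p.2 r (by rw [hr])
    have hv_sub : ∀ x ∈ vis, x ∈ p.2 := by
      intro x hx; rw [hsnd]; rw [PySem.Set.mem_update _ _ _]; exact Or.inl hx
    have hL_sub : ∀ x ∈ L, x ∈ p.2 := by
      intro x hx; rw [hsnd]; rw [PySem.Set.mem_update _ _ _]; exact Or.inr hx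
    have hp2_mem : ∀ x ∈ p.2, x ∈ vis ∨ x ∈ L := by
      intro x hx; rw [hsnd] at hx; exact (PySem.Set.mem_update _ _ _).mp hx
    refine ⟨?_, ?_, ?_, ?_, ?_, ?_, ?_, ?_⟩
    · intro x hx; exact m1 x (hv_sub x hx)
    · intro x hx
      rcases m2 x hx with h1 | ⟨u, hu, hx'⟩
      · rcases hp2_mem x h1 with h2 | h2
        · exact Or.inl h2
        · exact Or.inr ⟨u0, List.mem_cons_self, h2⟩
      · exact Or.inr ⟨u, List.mem_cons_of_mem _ hu, hx'⟩
    · intro u hu v hv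
      rcases List.mem_cons.mp hu with rfl | hu'
      · exact m1 v (hL_sub v hv)
      · exact m3 u hu' v hv
    · intro hnd
      exact m4 (by rw [hsnd]; exact PySem.Set.nodup_update _ _ hnd)
    · have m5' : r.1.length + (vis.update L).length = p.1.length + r.2.length := by
        rw [← hsnd]; exact m5
      have f4' : p.1.length + vis.length = nxt.length + (vis.update L).length := by
        rw [← hsnd]; exact f4
      omega
    · intro x hx; exact m6 x (f1 x hx)
    · intro x hx
      rcases m7 x hx with h1 | h1
      · rcases hp2_mem x h1 with h2 | h2
        · exact Or.inl h2
        · rcases f3 x h2 with h3 | h3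
          · exact Or.inl h3
          · exact Or.inr (m6 x h3)
      · exact Or.inr h1
    · intro hsub x hx
      refine m8 ?_ x hx
      intro y hy
      rcases f2 y hy with h1 | ⟨h1, _⟩
      · exact hv_sub y (hsub y h1)
      · exact hL_sub y h1

-- A's loop: the result contains the start set, is R-sound and closed under edges.
lemma dfsStack_spec (g : PySem.Dict Int (List Int)) (allN : List Int)
    (hA : ∀ u v, v ∈ g.getD u [] → v ∈ allN)
    (R : Int → Prop) (hR : ∀ u v, R u → v ∈ g.getD u [] → R v) :
    ∀ (fuel : Nat) (stack : List Int) (vis : PySem.Set Int),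
    (∀ x ∈ stack, x ∈ vis) →
    (∀ x ∈ vis, R x) →
    (∀ x ∈ vis, x ∈ allN) →
    vis.Nodup →
    (∀ u ∈ vis, u ∉ stack → ∀ v ∈ g.getD u [], v ∈ vis) →
    stack.length + allN.length ≤ fuel + vis.length →
    (∀ x ∈ vis, x ∈ dfsStack g fuel stack vis) ∧
    (∀ x ∈ dfsStack g fuel stack vis, R x) ∧
    (∀ u ∈ dfsStack g fuel stack vis, ∀ v ∈ g.getD u [], v ∈ dfsStack g fuel stack vis) := by
  intro fuel
  induction fuel with
  | zero =>
    intro stack vis h1 h2 h3 hnd h6 hfuel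
    have hlen : vis.length ≤ allN.length := nodup_length_le vis allN hnd (fun x hx => h3 x hx)
    have hstack : stack = [] := by
      cases stack with
      | nil => rfl
      | cons a t => exfalso; simp at hfuel; omega
    subst hstack
    exact ⟨fun x hx => hx, h2, fun u hu v hv => h6 u hu (by simp) v hv⟩
  | succ fuel ih =>
    intro stack vis h1 h2 h3 hnd h6 hfuel
    cases stack with
    | nil =>
      exact ⟨fun x hx => hx, h2, fun u hu v hv => h6 u hu (by simp) v hv⟩
    | cons current rest =>
      set L := g.getD current [] with hLdef
      set sv := L.foldl (fun (sv : List Int × PySem.Set Int) n =>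
        if PySem.Set.contains sv.2 n then sv else (n :: sv.1, PySem.Set.add sv.2 n)) (rest, vis) with hsv
      have hres : dfsStack g (fuel+1) (current :: rest) vis = dfsStack g fuel sv.1 sv.2 := rfl
      have hsnd : sv.2 = PySem.Set.update vis L := by rw [hsv]; exact foldStep_snd (fun s n => n :: s) L rest vis
      obtain ⟨f1, f2, f3, f4⟩ := foldStep_fst (fun s n => n :: s)
        (by intro s n x; simp) (by intro s n; simp) L rest vis sv hsv
      have hv_sub : ∀ x ∈ vis, x ∈ sv.2 := fun x hx => by
        rw [hsnd]; exact (PySem.Set.mem_update _ _ _).mpr (Or.inl hx)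
      have hL_sub : ∀ x ∈ L, x ∈ sv.2 := fun x hx => by
        rw [hsnd]; exact (PySem.Set.mem_update _ _ _).mpr (Or.inr hx)
      have hmem2 : ∀ x ∈ sv.2, x ∈ vis ∨ x ∈ L := fun x hx => by
        rw [hsnd] at hx; exact (PySem.Set.mem_update _ _ _).mp hx
      have hcur : current ∈ vis := h1 current List.mem_cons_self
      obtain ⟨c1, c2, c3⟩ := ih sv.1 sv.2
        (by intro x hx
            rcases f2 x hx with hx' | ⟨hx', _⟩
            · exact hv_sub x (h1 x (List.mem_cons_of_mem _ hx'))
            · exact hL_sub x hx')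
        (by intro x hx
            rcases hmem2 x hx with h' | h'
            · exact h2 x h'
            · exact hR current x (h2 current hcur) h')
        (by intro x hx
            rcases hmem2 x hx with h' | h'
            · exact h3 x h'
            · exact hA current x h')
        (by rw [hsnd]; exact PySem.Set.nodup_update _ _ hnd)
        (by intro u hu hns v hv
            have huvis : u ∈ vis := by
              rcases hmem2 u hu with h' | h'
              · exact h'
              · rcases f3 u h' with h'' | h''
                · exact h''
                · exact absurd h'' hns
            by_cases hc : u = current
            · subst hc; exact hL_sub v hv
            · refine hv_sub v (h6 u huvis ?_ v hv)
              intro hmem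
              rcases List.mem_cons.mp hmem with h' | h'
              · exact hc h'
              · exact hns (f1 u h'))
        (by have hf4 : sv.1.length + vis.length = rest.length + sv.2.length := f4
            simp only [List.length_cons] at hfuel
            omega)
      exact ⟨fun x hx => c1 x (hv_sub x hx), c2, c3⟩

-- B's loop: same three conclusions.
lemma bfsLevels_spec (g : PySem.Dict Int (List Int)) (allN : List Int)
    (hA : ∀ u v, v ∈ g.getD u [] → v ∈ allN)
    (R : Int → Prop) (hR : ∀ u v, R u → v ∈ g.getD u [] → R v) :
    ∀ (fuel : Nat) (frontier : List Int) (vis : PySem.Set Int),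
    (∀ x ∈ frontier, x ∈ vis) →
    (∀ x ∈ vis, R x) →
    (∀ x ∈ vis, x ∈ allN) →
    vis.Nodup →
    (∀ u ∈ vis, u ∉ frontier → ∀ v ∈ g.getD u [], v ∈ vis) →
    (frontier ≠ [] → allN.length + 1 ≤ fuel + vis.length) →
    (∀ x ∈ vis, x ∈ bfsLevels g fuel frontier vis) ∧
    (∀ x ∈ bfsLevels g fuel frontier vis, R x) ∧
    (∀ u ∈ bfsLevels g fuel frontier vis, ∀ v ∈ g.getD u [], v ∈ bfsLevels g fuel frontier vis) := by
  intro fuel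
  induction fuel with
  | zero =>
    intro frontier vis h1 h2 h3 hnd h6 hfuel
    have hlen : vis.length ≤ allN.length := nodup_length_le vis allN hnd (fun x hx => h3 x hx)
    have hfr : frontier = [] := by
      cases frontier with
      | nil => rfl
      | cons a t => exfalso; have := hfuel (by simp); omega
    subst hfr
    exact ⟨fun x hx => hx, h2, fun u hu v hv => h6 u hu (by simp) v hv⟩
  | succ fuel ih =>
    intro frontier vis h1 h2 h3 hnd h6 hfuel
    cases frontier with
    | nil =>
      exact ⟨fun x hx => hx, h2, fun u hu v hv => h6 u hu (by simp) v hv⟩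
    | cons u0 fr =>
      set nv := (u0 :: fr).foldl
        (fun (acc : List Int × PySem.Set Int) u =>
          (g.getD u []).foldl
            (fun (acc : List Int × PySem.Set Int) v =>
              if PySem.Set.contains acc.2 v then acc else (acc.1 ++ [v], PySem.Set.add acc.2 v))
            acc)
        ([], vis) with hnv
      have hres : bfsLevels g (fuel+1) (u0 :: fr) vis = bfsLevels g fuel nv.1 nv.2 := rfl
      obtain ⟨m1, m2, m3, m4, m5, m6, m7, m8⟩ := midFold_facts g (u0 :: fr) [] vis nv hnv
      have hfr_vis : ∀ u ∈ (u0 :: fr), u ∈ vis := h1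
      obtain ⟨c1, c2, c3⟩ := ih nv.1 nv.2
        (m8 (by intro x hx; cases hx) )
        (by intro x hx
            rcases m2 x hx with h' | ⟨u, hu, hx'⟩
            · exact h2 x h'
            · exact hR u x (h2 u (hfr_vis u hu)) hx')
        (by intro x hx
            rcases m2 x hx with h' | ⟨u, hu, hx'⟩
            · exact h3 x h'
            · exact hA u x hx')
        (m4 hnd)
        (by intro u hu hns v hv
            rcases m7 u hu with h' | h'
            · by_cases hc : u ∈ (u0 :: fr)
              · exact m3 u hc v hv
              · exact m1 v (h6 u h' hc v hv)
            · exact absurd h' hns)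
        (by intro hne
            have hm5 : nv.1.length + vis.length = 0 + nv.2.length := m5
            have hpos : 1 ≤ nv.1.length := by
              cases hq : nv.1 with
              | nil => exact absurd hq hne
              | cons a t => simp
            have := hfuel (by simp)
            omega)
      exact ⟨fun x hx => c1 x (m1 x hx), c2, c3⟩

lemma visitedA_iff (pipes : List (Int × Int)) (s x : Int) :
    x ∈ dfsStack (buildAdj pipes) (pipes.length + 1) [s] (PySem.Set.ofList [s]) ↔
      Reaches pipes s x := by
  have hself : PySem.Set.ofList [s] = [s] := PySem.Set.ofList_eq_self_of_nodup _ (List.nodup_singleton s)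
  have hA : ∀ u v, v ∈ (buildAdj pipes).getD u [] → v ∈ PySem.Set.ofList (s :: pipes.map Prod.snd) := by
    intro u v hv
    refine (PySem.Set.mem_ofList _ _).mpr (List.mem_cons_of_mem _ ?_)
    exact List.mem_map.mpr ⟨(u, v), (mem_adj pipes u v).mp hv, rfl⟩
  have hR : ∀ u v, Reaches pipes s u → v ∈ (buildAdj pipes).getD u [] → Reaches pipes s v := by
    intro u v hu hv
    exact Relation.ReflTransGen.tail hu ((mem_adj pipes u v).mp hv)
  have h1 : ∀ x ∈ [s], x ∈ PySem.Set.ofList [s] := by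
    intro x hx; rw [hself]; exact hx
  have h2 : ∀ x ∈ PySem.Set.ofList [s], Reaches pipes s x := by
    intro x hx
    rw [hself] at hx
    rcases List.mem_singleton.mp hx with rfl
    exact Relation.ReflTransGen.refl
  have h3 : ∀ x ∈ PySem.Set.ofList [s], x ∈ PySem.Set.ofList (s :: pipes.map Prod.snd) := by
    intro x hx
    rw [hself] at hx
    rcases List.mem_singleton.mp hx with rfl
    exact (PySem.Set.mem_ofList _ _).mpr List.mem_cons_self
  have hnd : (PySem.Set.ofList [s]).Nodup := PySem.Set.nodup_ofList _
  have h6 : ∀ u ∈ PySem.Set.ofList [s], u ∉ [s] → ∀ v ∈ (buildAdj pipes).getD u [], v ∈ PySem.Set.ofList [s] := by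
    intro u hu hns
    rw [hself] at hu
    exact absurd hu hns
  have hNlen : (PySem.Set.ofList (s :: pipes.map Prod.snd)).length ≤ pipes.length + 1 := by
    have := PySem.Set.length_ofList_le (s :: pipes.map Prod.snd)
    simpa using this
  obtain ⟨c1, c2, c3⟩ := dfsStack_spec (buildAdj pipes) (PySem.Set.ofList (s :: pipes.map Prod.snd))
    hA (Reaches pipes s) hR (pipes.length + 1) [s] (PySem.Set.ofList [s]) h1 h2 h3 hnd h6
    (by rw [hself]; simp; omega)
  constructor
  · exact c2 x
  · intro h
    induction h with
    | refl => exact c1 s (by rw [hself]; exact List.mem_singleton.mpr rfl)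
    | tail hab hbc ih => exact c3 _ ih _ ((mem_adj pipes _ _).mpr hbc)

lemma visitedB_iff (pipes : List (Int × Int)) (s x : Int) :
    x ∈ bfsLevels (buildAdj pipes) (pipes.length + 2) [s] (PySem.Set.ofList [s]) ↔
      Reaches pipes s x := by
  have hself : PySem.Set.ofList [s] = [s] := PySem.Set.ofList_eq_self_of_nodup _ (List.nodup_singleton s)
  have hA : ∀ u v, v ∈ (buildAdj pipes).getD u [] → v ∈ PySem.Set.ofList (s :: pipes.map Prod.snd) := by
    intro u v hv
    refine (PySem.Set.mem_ofList _ _).mpr (List.mem_cons_of_mem _ ?_)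
    exact List.mem_map.mpr ⟨(u, v), (mem_adj pipes u v).mp hv, rfl⟩
  have hR : ∀ u v, Reaches pipes s u → v ∈ (buildAdj pipes).getD u [] → Reaches pipes s v := by
    intro u v hu hv
    exact Relation.ReflTransGen.tail hu ((mem_adj pipes u v).mp hv)
  have h1 : ∀ x ∈ [s], x ∈ PySem.Set.ofList [s] := by
    intro x hx; rw [hself]; exact hx
  have h2 : ∀ x ∈ PySem.Set.ofList [s], Reaches pipes s x := by
    intro x hx
    rw [hself] at hx
    rcases List.mem_singleton.mp hx with rfl
    exact Relation.ReflTransGen.refl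
  have h3 : ∀ x ∈ PySem.Set.ofList [s], x ∈ PySem.Set.ofList (s :: pipes.map Prod.snd) := by
    intro x hx
    rw [hself] at hx
    rcases List.mem_singleton.mp hx with rfl
    exact (PySem.Set.mem_ofList _ _).mpr List.mem_cons_self
  have hnd : (PySem.Set.ofList [s]).Nodup := PySem.Set.nodup_ofList _
  have h6 : ∀ u ∈ PySem.Set.ofList [s], u ∉ [s] → ∀ v ∈ (buildAdj pipes).getD u [], v ∈ PySem.Set.ofList [s] := by
    intro u hu hns
    rw [hself] at hu
    exact absurd hu hns
  have hNlen : (PySem.Set.ofList (s :: pipes.map Prod.snd)).length ≤ pipes.length + 1 := by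
    have := PySem.Set.length_ofList_le (s :: pipes.map Prod.snd)
    simpa using this
  obtain ⟨c1, c2, c3⟩ := bfsLevels_spec (buildAdj pipes) (PySem.Set.ofList (s :: pipes.map Prod.snd))
    hA (Reaches pipes s) hR (pipes.length + 2) [s] (PySem.Set.ofList [s]) h1 h2 h3 hnd h6
    (by intro _; rw [hself]; simp; omega)
  constructor
  · exact c2 x
  · intro h
    induction h with
    | refl => exact c1 s (by rw [hself]; exact List.mem_singleton.mpr rfl)
    | tail hab hbc ih => exact c3 _ ih _ ((mem_adj pipes _ _).mpr hbc)

-- The per-storage unreachable list, as B computes it.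
def unreachList (cities : List Int) (pipes : List (Int × Int)) (s : Int) : List Int :=
  cities.filter (fun c =>
    !(PySem.Set.contains (bfsLevels (buildAdj pipes) (pipes.length + 2) [s] (PySem.Set.ofList [s])) c))

lemma unreachA_eq (cities : List Int) (pipes : List (Int × Int)) (s : Int) :
    cities.foldl (fun acc city =>
      if PySem.Set.contains (dfsStack (buildAdj pipes) (pipes.length + 1) [s] (PySem.Set.ofList [s])) city
      then acc else acc ++ [city]) []
    = unreachList cities pipes s := by
  have hstep : (fun (acc : List Int) city =>
      if PySem.Set.contains (dfsStack (buildAdj pipes) (pipes.length + 1) [s] (PySem.Set.ofList [s])) city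
      then acc else acc ++ [city])
      = (fun (acc : List Int) city =>
        if (!PySem.Set.contains (dfsStack (buildAdj pipes) (pipes.length + 1) [s] (PySem.Set.ofList [s])) city) = true
        then acc ++ [id city] else acc) := by
    funext acc city
    cases h : PySem.Set.contains (dfsStack (buildAdj pipes) (pipes.length + 1) [s] (PySem.Set.ofList [s])) city <;>
      simp
  rw [hstep, PySem.List.foldl_append_if]
  rw [List.map_id, List.nil_append]
  unfold unreachList
  apply List.filter_congr
  intro c _
  have hmem : (c ∈ dfsStack (buildAdj pipes) (pipes.length + 1) [s] (PySem.Set.ofList [s])) ↔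
      (c ∈ bfsLevels (buildAdj pipes) (pipes.length + 2) [s] (PySem.Set.ofList [s])) :=
    (visitedA_iff pipes s c).trans (visitedB_iff pipes s c).symm
  have hca : ∀ (t : PySem.Set Int), PySem.Set.contains t c = true ↔ c ∈ t := by
    intro t; simp [PySem.Set.contains_eq_listContains]
  have : PySem.Set.contains (dfsStack (buildAdj pipes) (pipes.length + 1) [s] (PySem.Set.ofList [s])) c
       = PySem.Set.contains (bfsLevels (buildAdj pipes) (pipes.length + 2) [s] (PySem.Set.ofList [s])) c :=
    Bool.eq_iff_iff.mpr (((hca _).trans hmem).trans (hca _).symm)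
  rw [this]

-- The storage fold: A's plain accumulator versus B's accumulator-with-cache.
lemma fold_storages_eq (cities : List Int) (pipes : List (Int × Int)) :
    ∀ (storages : List Int) (res : List (Int × List Int)) (cache : PySem.Dict Int (List Int)),
    (∀ k v, cache.get? k = some v → v = unreachList cities pipes k) →
    storages.foldl (fun result storage =>
      let visited := dfsStack (buildAdj pipes) (pipes.length + 1) [storage] (PySem.Set.ofList [storage])
      let unreachable := cities.foldl
        (fun acc city => if PySem.Set.contains visited city then acc else acc ++ [city]) []
      if unreachable.isEmpty then result else result ++ [(storage, unreachable)]) res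
    = (storages.foldl (fun (rc : List (Int × List Int) × PySem.Dict Int (List Int)) storage =>
        match rc.2.get? storage with
        | some unreachable =>
            (if unreachable.isEmpty then rc.1 else rc.1 ++ [(storage, unreachable)], rc.2)
        | none =>
            let visited := bfsLevels (buildAdj pipes) (pipes.length + 2) [storage] (PySem.Set.ofList [storage])
            let unreachable := cities.filter (fun c => !(PySem.Set.contains visited c))
            (if unreachable.isEmpty then rc.1 else rc.1 ++ [(storage, unreachable)],
             rc.2.insert storage unreachable)) (res, cache)).1 := by
  intro storages
  induction storages with
  | nil => intro res cache hinv; rfl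
  | cons s rest ih =>
    intro res cache hinv
    rw [List.foldl_cons, List.foldl_cons]
    dsimp only
    cases hq : cache.get? s with
    | some v =>
      have hv : v = unreachList cities pipes s := hinv s v hq
      rw [unreachA_eq cities pipes s, hv]
      exact ih _ _ hinv
    | none =>
      rw [unreachA_eq cities pipes s]
      have hfil : cities.filter (fun c =>
          !(PySem.Set.contains (bfsLevels (buildAdj pipes) (pipes.length + 2) [s] (PySem.Set.ofList [s])) c))
          = unreachList cities pipes s := rfl
      rw [hfil]
      apply ih
      intro k v hk
      rw [PySem.Dict.get?_insert] at hk
      by_cases hks : k = s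
      · subst hks
        rw [if_pos rfl] at hk
        exact (Option.some_inj.mp hk).symm
      · rw [if_neg hks] at hk
        exact hinv k v hk

-- ===== VERDICT (by name: the statement is the Claim_ definition above) =====
theorem check_gas_supply_spec : Claim_equal_check_gas_supply := by
  intro cities storages pipes _
  unfold Spec_check_gas_supply check_gas_supply check_gas_supply_alt
  exact fold_storages_eq cities pipes storages [] PySem.Dict.empty
    (by intro k v h; simp [PySem.Dict.get?_empty] at h)
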